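-- pv_equiv track=rewrite | github.com/sbn1/Competitive_programming | standart_problems/Backtracking/Find_all_increasing_subsequences_in_an_array.py | find_increasing_subsequences
-- ===== SOURCE A (Python) =====
-- from typing import List
--
-- def find_increasing_subsequences(nums:List[int], sol:List[int], tmp:List[int], index:int)->List[List[int]]:
--
--     #Base Case
--     if len(tmp)>1:
--         #select only the disting sequences
--         if tmp not in sol:
--             sol.append(tmp[:])
--
--     for i in range(index, len(nums)):
--
--         if not tmp or tmp[-1] < nums[i]:
--             tmp += [nums[i]]
--             find_increasing_subsequences(nums, sol, tmp, i + 1)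
--             tmp.pop()
--     return sol
-- ===== SOURCE B (Python) =====
-- def find_increasing_subsequences(nums, sol, tmp, index):
--     # Phase 1: pure recursive generator of candidates in DFS pre-order.
--     # The extension condition depends only on cur's last element, so the valid
--     # extension indices can be listed up front and the subtrees flat-mapped.
--     def gen(cur, start):
--         ext = [(i, nums[i]) for i in range(start, len(nums))
--                if not cur or cur[-1] < nums[i]]
--         return ([list(cur)] if len(cur) > 1 else []) \
--             + [s for (i, v) in ext for s in gen(cur + [v], i + 1)]
--     # Phase 2: one dedup pass with a hash set seeded from sol.
--     seen = set(map(tuple, sol))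
--     for cand in gen(tmp, index):
--         t = tuple(cand)
--         if t not in seen:
--             seen.add(t)
--             sol.append(cand)
--     return sol
-- ===== Notes on version B (the rewrite author's own statement) =====
-- stated objective: alternative
-- what changed: A interleaves recursive backtracking on a mutated tmp with a linear 'tmp not in sol' scan at every node; B is two pure phases: since the extension test depends only on cur's last element, a flat-map recursion over the precomputed list of valid extension indices yields all candidates in pre-order, then a single hash-set dedup pass (seeded from sol) appends the new ones to sol.
import Mathlib
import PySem

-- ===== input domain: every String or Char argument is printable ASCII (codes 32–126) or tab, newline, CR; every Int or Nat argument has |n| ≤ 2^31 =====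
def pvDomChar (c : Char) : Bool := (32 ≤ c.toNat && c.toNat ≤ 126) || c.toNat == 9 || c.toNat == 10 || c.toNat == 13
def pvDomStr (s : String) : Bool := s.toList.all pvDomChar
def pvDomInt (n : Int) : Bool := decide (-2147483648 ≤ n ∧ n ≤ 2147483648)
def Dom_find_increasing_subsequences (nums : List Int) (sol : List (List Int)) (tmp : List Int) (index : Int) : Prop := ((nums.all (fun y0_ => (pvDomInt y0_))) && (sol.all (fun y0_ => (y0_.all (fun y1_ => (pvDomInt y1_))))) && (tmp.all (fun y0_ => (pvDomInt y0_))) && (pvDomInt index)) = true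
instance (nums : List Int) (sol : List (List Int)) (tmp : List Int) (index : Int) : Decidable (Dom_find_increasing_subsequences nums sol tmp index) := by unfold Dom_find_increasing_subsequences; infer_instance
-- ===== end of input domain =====

-- B replaces A's backtracking-with-interleaved-'tmp not in sol'-scan by two pure phases
-- (flat-map recursion over precomputed extension indices, then one hash-set dedup pass);
-- equivalence is about the RETURN value (both Pythons also append the same new sequences
-- to `sol` in place, in the same order, and leave `tmp` as given).

-- ===== PORT A =====
-- A: recursive backtracking; at each node, append tmp to sol if len(tmp)>1 and tmp not in sol
-- (this entry step is pvADedup), then loop i from index to len(nums)-1, recursing with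
-- tmp + [nums[i]] when tmp is empty or tmp[-1] < nums[i].  The recursion is totalized by a
-- `fuel` counter; fuel = (len(nums) - index).toNat suffices because every recursive call and
-- every loop step increases the index by 1.
def pvADedup (sol : List (List Int)) (tmp : List Int) : List (List Int) :=
  if 1 < tmp.length && !(sol.contains tmp) then sol ++ [tmp] else sol

def pvAloop (nums : List Int) : Nat → List Int → Int → List (List Int) → List (List Int)
  | 0, _, _, sol => sol
  | fuel + 1, tmp, i, sol =>
    if i < (nums.length : Int) then
      match PySem.List.pyGet? nums i with
      | none => sol   -- Python raises IndexError here (i < -len); excluded by Pre_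
      | some v =>
        if tmp.isEmpty || decide (PySem.List.pyGetD tmp (-1) 0 < v) then
          -- recursive call find_increasing_subsequences(nums, sol, tmp+[v], i+1), inlined
          -- as its entry dedup step followed by its own loop; then continue this loop
          pvAloop nums fuel tmp (i + 1)
            (pvAloop nums fuel (tmp ++ [v]) (i + 1) (pvADedup sol (tmp ++ [v])))
        else
          pvAloop nums fuel tmp (i + 1) sol
    else sol

def find_increasing_subsequences (nums : List Int) (sol : List (List Int)) (tmp : List Int) (index : Int) : List (List Int) :=
  pvAloop nums ((nums.length - index).toNat) tmp index (pvADedup sol tmp)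

-- ===== PORT B =====
-- B phase 1: pure flat-map recursion.  `ext` is the comprehension
-- [(i, nums[i]) for i in range(start, len(nums)) if not cur or cur[-1] < nums[i]]
-- (a None from pyGet? means Python raises IndexError there; excluded by Pre_, the
-- filterMap drops it); the result is gen's head plus the flat-map over the subtrees.
def pvBHead (cur : List Int) : List (List Int) :=
  if 1 < cur.length then [cur] else []

def pvExt (nums : List Int) (cur : List Int) (start : Int) : List (Int × Int) :=
  (PySem.List.pyRange start (nums.length : Int) 1).filterMap (fun i =>
    match PySem.List.pyGet? nums i with
    | some v =>
      if cur.isEmpty || decide (PySem.List.pyGetD cur (-1) 0 < v) then some (i, v) else none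
    | none => none)

theorem pvExt_mem_lt (nums : List Int) (cur : List Int) (start : Int) (p : Int × Int)
    (h : p ∈ pvExt nums cur start) :
    ((nums.length : Int) - (p.1 + 1)).toNat < ((nums.length : Int) - start).toNat := by
  unfold pvExt at h
  obtain ⟨i, hi, hf⟩ := List.mem_filterMap.mp h
  have hr := (PySem.List.mem_pyRange_one).mp hi
  have : p.1 = i := by
    cases hg : PySem.List.pyGet? nums i with
    | none => simp [hg] at hf
    | some v =>
      simp [hg] at hf
      rcases hf with ⟨-, h2⟩
      simp [← h2]
  omega

def pvGen (nums : List Int) (cur : List Int) (start : Int) : List (List Int) :=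
  pvBHead cur ++
    (pvExt nums cur start).attach.flatMap
      (fun p => pvGen nums (cur ++ [p.1.2]) (p.1.1 + 1))
termination_by ((nums.length : Int) - start).toNat
decreasing_by exact pvExt_mem_lt nums cur start p.1 p.2

-- B phase 2: one dedup pass over the generated candidates with a set seeded from sol.
def find_increasing_subsequences_alt (nums : List Int) (sol : List (List Int)) (tmp : List Int) (index : Int) : List (List Int) :=
  ((pvGen nums tmp index).foldl
    (fun (p : List (List Int) × PySem.Set (List Int)) c =>
      if PySem.Set.contains p.2 c then p else (p.1 ++ [c], PySem.Set.add p.2 c))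
    (sol, PySem.Set.ofList sol)).1

-- ===== PRECONDITION & SPEC =====
-- Pre_ excludes exactly the inputs where Python A raises IndexError: index < -len(nums)
-- makes the first loop iteration evaluate nums[index] out of range.
def Pre_find_increasing_subsequences (nums : List Int) (sol : List (List Int)) (tmp : List Int) (index : Int) : Prop :=
  -(nums.length : Int) ≤ index

instance (nums : List Int) (sol : List (List Int)) (tmp : List Int) (index : Int) : Decidable (Pre_find_increasing_subsequences nums sol tmp index) := by unfold Pre_find_increasing_subsequences; infer_instance

def pvWitness_find_increasing_subsequences : List Int × List (List Int) × List Int × Int := ([1, 2, 2], [], [], 0)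

def Spec_find_increasing_subsequences (nums : List Int) (sol : List (List Int)) (tmp : List Int) (index : Int) (out : List (List Int)) : Prop := out = find_increasing_subsequences_alt nums sol tmp index
instance (nums : List Int) (sol : List (List Int)) (tmp : List Int) (index : Int) (out : List (List Int)) : Decidable (Spec_find_increasing_subsequences nums sol tmp index out) := by unfold Spec_find_increasing_subsequences; infer_instance

-- ===== CLAIM (what is proved, stated in full; the proofs are below) =====
def Claim_equal_find_increasing_subsequences : Prop := ∀ (nums : List Int) (sol : List (List Int)) (tmp : List Int) (index : Int), Dom_find_increasing_subsequences nums sol tmp index → Pre_find_increasing_subsequences nums sol tmp index → Spec_find_increasing_subsequences nums sol tmp index (find_increasing_subsequences nums sol tmp index)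

-- ===== LEMMAS AND PROOFS =====

-- A's inline dedup step, as a fold step over candidates.
def pvStep (s : List (List Int)) (c : List Int) : List (List Int) :=
  if s.contains c then s else s ++ [c]

theorem pvADedup_eq_fold (sol : List (List Int)) (tmp : List Int) :
    pvADedup sol tmp = (pvBHead tmp).foldl pvStep sol := by
  unfold pvADedup pvBHead
  by_cases hl : 1 < tmp.length
  · by_cases hm : (sol.contains tmp) = true
    · have hm' : tmp ∈ sol := by simpa using hm
      simp [hl, hm', pvStep]
    · have hm' : tmp ∉ sol := by simpa using hm
      simp [hl, hm', pvStep]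
  · simp [hl]

theorem pvFlatMap_attach {α β : Type} (l : List α) (f : α → List β) :
    l.attach.flatMap (fun p => f p.1) = l.flatMap f := by
  induction l with
  | nil => rfl
  | cons a t ih => simp [List.attach_cons, List.flatMap_map, ih]

theorem pvGen_unfold (nums cur : List Int) (start : Int) :
    pvGen nums cur start
      = pvBHead cur ++ (pvExt nums cur start).flatMap (fun p => pvGen nums (cur ++ [p.2]) (p.1 + 1)) := by
  rw [pvGen]
  exact congrArg (pvBHead cur ++ ·)
    (pvFlatMap_attach (pvExt nums cur start) (fun q => pvGen nums (cur ++ [q.2]) (q.1 + 1)))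

-- the "tail" of gen: the flat-map part, what the loop of A accounts for
def pvTail (nums cur : List Int) (start : Int) : List (List Int) :=
  (pvExt nums cur start).flatMap (fun p => pvGen nums (cur ++ [p.2]) (p.1 + 1))

theorem pvExt_nil (nums cur : List Int) (start : Int) (h : (nums.length : Int) ≤ start) :
    pvExt nums cur start = [] := by
  unfold pvExt
  rw [PySem.List.pyRange_one_eq_nil h]
  rfl

theorem pvExt_cons (nums cur : List Int) (i : Int) (hi : i < (nums.length : Int)) (v : Int)
    (hg : PySem.List.pyGet? nums i = some v) :
    pvExt nums cur i
      = (if cur.isEmpty || decide (PySem.List.pyGetD cur (-1) 0 < v) then [(i, v)] else [])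
        ++ pvExt nums cur (i + 1) := by
  unfold pvExt
  rw [PySem.List.pyRange_one_cons hi]
  simp only [List.filterMap_cons, hg]
  by_cases hc : (cur.isEmpty || decide (PySem.List.pyGetD cur (-1) 0 < v)) = true
  · rw [if_pos hc, if_pos hc]
    rfl
  · rw [if_neg hc, if_neg hc]
    rfl

-- main invariant: A's fueled loop = fold of pvStep over gen's tail, given enough fuel
theorem pvAloop_eq (nums : List Int) :
    ∀ (fuel : Nat) (tmp : List Int) (i : Int) (sol : List (List Int)),
      -(nums.length : Int) ≤ i → ((nums.length : Int) - i).toNat ≤ fuel →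
      pvAloop nums fuel tmp i sol = (pvTail nums tmp i).foldl pvStep sol := by
  intro fuel
  induction fuel with
  | zero =>
    intro tmp i sol _ hf
    have : (nums.length : Int) ≤ i := by omega
    simp [pvAloop, pvTail, pvExt_nil nums tmp i this]
  | succ f ih =>
    intro tmp i sol hlo hf
    rw [pvAloop]
    by_cases hi : i < (nums.length : Int)
    · rw [if_pos hi]
      have hg : ∃ v, PySem.List.pyGet? nums i = some v := by
        cases hg : PySem.List.pyGet? nums i with
        | some v => exact ⟨v, rfl⟩
        | none =>
          exfalso
          have := (PySem.List.pyGet?_eq_none_iff (xs := nums) (i := i)).mp hg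
          simp [PySem.Raise.InRange] at this
          omega
      obtain ⟨v, hgv⟩ := hg
      rw [hgv]
      have hlo' : -(nums.length : Int) ≤ i + 1 := by omega
      have hf' : ((nums.length : Int) - (i + 1)).toNat ≤ f := by omega
      rw [pvTail, pvExt_cons nums tmp i hi v hgv]
      by_cases hc : (tmp.isEmpty || decide (PySem.List.pyGetD tmp (-1) 0 < v)) = true
      · rw [if_pos hc]
        simp only [hc, if_true, List.flatMap_append, List.flatMap_cons, List.flatMap_nil,
          List.append_nil, List.foldl_append]
        rw [ih tmp (i + 1) _ hlo' hf', ih (tmp ++ [v]) (i + 1) _ hlo' hf']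
        rw [pvGen_unfold, List.foldl_append, pvADedup_eq_fold]
        rfl
      · rw [if_neg hc]
        simp only [hc, Bool.false_eq_true, if_false, List.nil_append]
        exact ih tmp (i + 1) sol hlo' hf'
    · rw [if_neg hi]
      have : (nums.length : Int) ≤ i := by omega
      simp [pvTail, pvExt_nil nums tmp i this]

theorem pvA_eq_fold (nums : List Int) (sol : List (List Int)) (tmp : List Int) (index : Int)
    (h : -(nums.length : Int) ≤ index) :
    find_increasing_subsequences nums sol tmp index
      = (pvGen nums tmp index).foldl pvStep sol := by
  rw [find_increasing_subsequences, pvAloop_eq nums _ tmp index _ h (by omega)]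
  rw [pvGen_unfold, List.foldl_append, pvADedup_eq_fold]
  rfl

theorem pvFold_pair (cands : List (List Int)) (sol : List (List Int)) (seen : PySem.Set (List Int))
    (hinv : ∀ x, PySem.Set.contains seen x = sol.contains x) :
    (cands.foldl
      (fun (p : List (List Int) × PySem.Set (List Int)) c =>
        if PySem.Set.contains p.2 c then p else (p.1 ++ [c], PySem.Set.add p.2 c))
      (sol, seen)).1 = cands.foldl pvStep sol := by
  induction cands generalizing sol seen with
  | nil => rfl
  | cons c cs ih =>
    simp only [List.foldl_cons]
    by_cases h : PySem.Set.contains seen c = true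
    · rw [if_pos h]
      have hs : sol.contains c = true := by rw [← hinv]; exact h
      have hs' : c ∈ sol := by simpa using hs
      rw [show pvStep sol c = sol by simp [pvStep, hs']]
      exact ih sol seen hinv
    · rw [if_neg h]
      have hs0 : ¬ sol.contains c = true := by rw [← hinv]; exact h
      have hs : c ∉ sol := by simpa using hs0
      rw [show pvStep sol c = sol ++ [c] by simp [pvStep, hs]]
      have hc' : c ∉ seen := by simpa [PySem.Set.contains] using h
      have hadd : PySem.Set.add seen c = seen ++ [c] := by simp [PySem.Set.add, hc']
      refine ih (sol ++ [c]) (PySem.Set.add seen c) ?_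
      intro x
      rw [hadd]
      have hx := hinv x
      simp only [PySem.Set.contains] at hx ⊢
      simp [List.contains_eq_mem] at hx ⊢
      simp [hx]

-- ===== VERDICT (by name: the statement is the Claim_ definition above) =====
theorem find_increasing_subsequences_spec : Claim_equal_find_increasing_subsequences := by
  intro nums sol tmp index _ hpre
  unfold Spec_find_increasing_subsequences find_increasing_subsequences_alt
  rw [pvFold_pair]
  · exact pvA_eq_fold nums sol tmp index hpre
  · intro x
    simp [PySem.Set.contains, PySem.Set.mem_ofList, List.contains_eq_mem]
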